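-- pv_equiv track=rewrite | github.com/r453/BitFlippedTLDs | bitflip_tld_checker.py | generate_bitflip_variants
-- ===== SOURCE A (Python) =====
-- from typing import Set, List, Tuple
--
-- def flip_bit(char: str, bit_position: int) -> str:
--     """
--     Flip a single bit in a character.
--
--     Args:
--         char: Single character to flip
--         bit_position: Which bit to flip (0-7)
--
--     Returns:
--         Character with the specified bit flipped
--     """
--     char_code = ord(char)
--     flipped_code = char_code ^ (1 << bit_position)
--     # Only return printable ASCII characters
--     if 32 <= flipped_code <= 126:
--         return chr(flipped_code)
--     return None
--
-- def generate_bitflip_variants(text: str) -> Set[str]: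
--     """
--     Generate all possible single-bit flips for each character in text.
--
--     Args:
--         text: String to generate variants for (e.g., 'google' or 'com')
--
--     Returns:
--         Set of bit-flipped variants
--     """
--     variants = set()
--
--     for char_idx, char in enumerate(text):
--         for bit_pos in range(8):  # 8 bits per byte
--             flipped_char = flip_bit(char, bit_pos)
--             if flipped_char and (flipped_char.isalnum() or flipped_char == '-'):
--                 # Build the flipped variant
--                 flipped = text[:char_idx] + flipped_char + text[char_idx + 1:]
--                 flipped = flipped.lower()
--                 # Valid domain characters: alphanumeric and hyphen
--                 if all(c.isalnum() or c == '-' for c in flipped):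
--                     variants.add(flipped)
--
--     return variants
-- ===== SOURCE B (Python) =====
-- def flip_bit(char, bit_position):
--     flipped_code = ord(char) ^ (1 << bit_position)
--     if 32 <= flipped_code <= 126:
--         return chr(flipped_code)
--     return None
--
-- def generate_bitflip_variants(text):
--     # Precompute the indices whose character is not a valid domain character;
--     # a flipped variant is valid iff every such index is the flipped position.
--     bad = [j for j, c in enumerate(text) if not (c.isalnum() or c == '-')]
--     variants = set()
--     if len(bad) >= 2:
--         return variants
--     for i, ch in enumerate(text):
--         if bad and bad[0] != i:
--             continue
--         for bit in range(8):
--             fc = flip_bit(ch, bit)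
--             if fc and (fc.isalnum() or fc == '-'):
--                 variants.add((text[:i] + fc + text[i + 1:]).lower())
--     return variants
-- ===== Notes on version B (the rewrite author's own statement) =====
-- stated objective: faster
-- what changed: B precomputes the list of invalid character positions once, replaces A's per-variant full all() rescan with a constant-time test that every invalid position is the flipped one, returns immediately when two or more positions are invalid, and skips every position but the single invalid one when exactly one exists.
import Mathlib
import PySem

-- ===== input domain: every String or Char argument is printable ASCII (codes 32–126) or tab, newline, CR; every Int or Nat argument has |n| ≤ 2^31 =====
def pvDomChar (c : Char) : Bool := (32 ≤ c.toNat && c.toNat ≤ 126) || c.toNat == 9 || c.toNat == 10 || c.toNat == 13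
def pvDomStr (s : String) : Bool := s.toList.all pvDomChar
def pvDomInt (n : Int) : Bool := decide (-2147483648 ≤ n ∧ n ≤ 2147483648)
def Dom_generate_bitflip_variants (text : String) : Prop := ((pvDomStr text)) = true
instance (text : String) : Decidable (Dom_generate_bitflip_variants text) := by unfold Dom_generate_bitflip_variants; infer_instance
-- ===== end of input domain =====

-- B precomputes the invalid positions once and replaces A's per-variant full rescan by a
-- constant-time test on that list (and an early exit when two positions are invalid); same results.

-- ===== PORT A =====
-- range(8) is ported as List.range 8 (the bit positions 0..7, exact); ord/chr via Char.toNat/Char.ofNat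
def flip_bit (char : Char) (bit_position : Nat) : Option Char :=
  let char_code := char.toNat
  let flipped_code := char_code ^^^ (1 <<< bit_position)
  if 32 ≤ flipped_code ∧ flipped_code ≤ 126 then some (Char.ofNat flipped_code) else none

def generate_bitflip_variants (text : String) : List String :=
  (PySem.List.enumerate text.toList).foldl (fun variants ic =>
    (List.range 8).foldl (fun variants bit_pos =>
      match flip_bit ic.2 bit_pos with
      | none => variants
      | some flipped_char =>
        if PySem.Chars.isalnum flipped_char || flipped_char == '-' then
          let flipped := PySem.List.slice text.toList none (some ic.1) ++ [flipped_char]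
              ++ PySem.List.slice text.toList (some (ic.1 + 1)) none
          let flippedL := PySem.Chars.lower flipped
          if flippedL.all (fun c => PySem.Chars.isalnum c || c == '-') then
            PySem.Set.add variants (String.ofList flippedL)
          else variants
        else variants) variants) []

-- ===== PORT B =====
def bad_indices (text : String) : List Int :=
  ((PySem.List.enumerate text.toList).filter
    (fun jc => !(PySem.Chars.isalnum jc.2 || jc.2 == '-'))).map (·.1)

def generate_bitflip_variants_alt (text : String) : List String :=
  let bad := bad_indices text
  if 2 ≤ bad.length then []
  else
    (PySem.List.enumerate text.toList).foldl (fun variants ic =>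
      if !bad.isEmpty && bad.headD 0 != ic.1 then variants
      else
        (List.range 8).foldl (fun variants bit =>
          match flip_bit ic.2 bit with
          | none => variants
          | some fc =>
            if PySem.Chars.isalnum fc || fc == '-' then
              PySem.Set.add variants (String.ofList (PySem.Chars.lower
                (PySem.List.slice text.toList none (some ic.1) ++ [fc]
                  ++ PySem.List.slice text.toList (some (ic.1 + 1)) none)))
            else variants) variants) []

-- ===== PRECONDITION & SPEC =====
def Spec_generate_bitflip_variants (text : String) (out : List String) : Prop := out = generate_bitflip_variants_alt text
instance (text : String) (out : List String) : Decidable (Spec_generate_bitflip_variants text out) := by unfold Spec_generate_bitflip_variants; infer_instance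

-- ===== CLAIM (what is proved, stated in full; the proofs are below) =====
def Claim_equal_generate_bitflip_variants : Prop := ∀ (text : String), Dom_generate_bitflip_variants text → Spec_generate_bitflip_variants text (generate_bitflip_variants text)

-- ===== LEMMAS AND PROOFS =====

-- valid domain character
def pvVOK (c : Char) : Bool := PySem.Chars.isalnum c || c == '-'

-- the "take/drop all valid" condition for position k
def pvGood (l : List Char) (k : Nat) : Bool :=
  (l.take k).all pvVOK && (l.drop (k + 1)).all pvVOK

theorem pvVOK_lower (c : Char) (h : pvDomChar c = true) :
    pvVOK (PySem.Chars.lowerChar c) = pvVOK c := by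
  have hlt : c.toNat < 128 := by
    simp [pvDomChar, Bool.or_eq_true, Bool.and_eq_true, decide_eq_true_eq] at h
    omega
  have haux : ∀ n : Nat, n < 128 →
      pvVOK (PySem.Chars.lowerChar (Char.ofNat n)) = pvVOK (Char.ofNat n) := by decide
  have := haux c.toNat hlt
  rwa [Char.ofNat_toNat] at this

theorem pvAsciiDomChar_ofNat (n : Nat) (h32 : 32 ≤ n) (h126 : n ≤ 126) :
    pvDomChar (Char.ofNat n) = true := by
  have haux : ∀ n : Nat, n < 127 → 32 ≤ n → pvDomChar (Char.ofNat n) = true := by decide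
  exact haux n (by omega) h32

theorem pvAll_congr {α : Type} (l : List α) (f g : α → Bool) (h : ∀ x ∈ l, f x = g x) :
    l.all f = l.all g := by
  induction l with
  | nil => rfl
  | cons a t ih => simp [List.all_cons, h a (by simp), ih (fun x hx => h x (by simp [hx]))]

theorem flip_bit_dom (c : Char) (b : Nat) (fc : Char) (h : flip_bit c b = some fc) :
    pvDomChar fc = true := by
  by_cases hr : 32 ≤ c.toNat ^^^ (1 <<< b) ∧ c.toNat ^^^ (1 <<< b) ≤ 126
  · have hfc : fc = Char.ofNat (c.toNat ^^^ (1 <<< b)) := by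
      simp [flip_bit, hr] at h
      exact h.symm
    rw [hfc]
    exact pvAsciiDomChar_ofNat _ hr.1 hr.2
  · simp [flip_bit, hr] at h

theorem mem_bad_iff (text : String) (j : Int) :
    j ∈ bad_indices text ↔
      ∃ (k : Nat) (h : k < text.toList.length), j = (k : Int) ∧ pvVOK text.toList[k] = false := by
  unfold bad_indices
  simp only [List.mem_map, List.mem_filter, PySem.List.mem_enumerate_iff]
  constructor
  · rintro ⟨⟨j', c⟩, ⟨⟨k, hk, hpe⟩, hbad⟩, rfl⟩
    obtain ⟨rfl, rfl⟩ := Prod.mk.injEq .. ▸ hpe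
    refine ⟨k, hk, by simp, ?_⟩
    simpa [pvVOK] using hbad
  · rintro ⟨k, hk, rfl, hbad⟩
    exact ⟨((k : Int), text.toList[k]), ⟨⟨k, hk, by simp⟩, by simpa [pvVOK] using hbad⟩, rfl⟩

theorem bad_pairwise (text : String) : (bad_indices text).Pairwise (· < ·) := by
  unfold bad_indices
  rw [List.pairwise_map]
  exact (PySem.List.pairwise_lt_enumerate _ _).filter _

-- pvGood characterises "every bad index equals k"
theorem pvGood_iff (l : List Char) (k : Nat) (hk : k < l.length) :
    pvGood l k = true ↔ ∀ m (h : m < l.length), m ≠ k → pvVOK l[m] = true := by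
  unfold pvGood
  simp only [Bool.and_eq_true, List.all_eq_true]
  constructor
  · rintro ⟨h1, h2⟩ m hm hne
    rcases Nat.lt_or_ge m k with hlt | hge
    · refine h1 _ ?_
      rw [List.mem_take_iff_getElem]
      exact ⟨m, by omega, rfl⟩
    · have hgt : k + 1 ≤ m := by omega
      have : l[m] ∈ l.drop (k + 1) := by
        rw [List.mem_drop_iff_getElem]
        exact ⟨m - (k+1), by omega, by congr 1; omega⟩
      exact h2 _ this
  · intro h
    constructor
    · intro c hc
      rw [List.mem_take_iff_getElem] at hc
      obtain ⟨m, hm, rfl⟩ := hc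
      exact h m (by omega) (by omega)
    · intro c hc
      rw [List.mem_drop_iff_getElem] at hc
      obtain ⟨m, hm, rfl⟩ := hc
      exact h _ (by omega) (by omega)

theorem pvGood_iff_bad (text : String) (k : Nat) (hk : k < text.toList.length) :
    pvGood text.toList k = true ↔ ∀ j ∈ bad_indices text, j = (k : Int) := by
  rw [pvGood_iff _ _ hk]
  constructor
  · intro h j hj
    rw [mem_bad_iff] at hj
    obtain ⟨m, hm, rfl, hbad⟩ := hj
    by_contra hne
    have : m ≠ k := by intro hmk; exact hne (by rw [hmk])
    rw [h m hm this] at hbad; cases hbad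
  · intro h m hm hne
    by_contra hbad
    have : (m : Int) ∈ bad_indices text := by
      rw [mem_bad_iff]
      exact ⟨m, hm, rfl, by simpa using hbad⟩
    have := h _ this
    exact hne (by exact_mod_cast this)

-- the all() check in A equals pvGood (for a valid in-range flipped char), under Dom
theorem check_eq (text : String) (hdom : Dom_generate_bitflip_variants text)
    (k : Nat) (fc : Char) (hfc : pvDomChar fc = true) (hv : pvVOK fc = true) :
    (PySem.Chars.lower (PySem.List.slice text.toList none (some (k : Int)) ++ [fc]
        ++ PySem.List.slice text.toList (some ((k : Int) + 1)) none)).all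
      (fun c => PySem.Chars.isalnum c || c == '-') = pvGood text.toList k := by
  have hdom' : ∀ c ∈ text.toList, pvDomChar c = true := by
    intro c hc
    exact List.all_eq_true.mp hdom c hc
  have h1 : PySem.List.slice text.toList none (some (k : Int)) = text.toList.take k :=
    PySem.List.slice_to_natCast _ _
  have h2 : PySem.List.slice text.toList (some ((k : Int) + 1)) none = text.toList.drop (k + 1) := by
    have : ((k : Int) + 1) = ((k + 1 : Nat) : Int) := by push_cast; ring
    rw [this, PySem.List.slice_from_natCast]
  rw [h1, h2]
  have hlow : ∀ (l : List Char), PySem.Chars.lower l = l.map PySem.Chars.lowerChar := fun _ => rfl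
  rw [hlow]
  simp only [List.map_append, List.all_append, List.all_map, List.map_cons, List.map_nil]
  have htake : (text.toList.take k).all (fun c => PySem.Chars.isalnum (PySem.Chars.lowerChar c) || PySem.Chars.lowerChar c == '-')
      = (text.toList.take k).all pvVOK := by
    apply pvAll_congr
    intro c hc
    have := pvVOK_lower c (hdom' c (List.mem_of_mem_take hc))
    simpa [pvVOK] using this
  have hdrop : (text.toList.drop (k+1)).all (fun c => PySem.Chars.isalnum (PySem.Chars.lowerChar c) || PySem.Chars.lowerChar c == '-')
      = (text.toList.drop (k+1)).all pvVOK := by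
    apply pvAll_congr
    intro c hc
    have := pvVOK_lower c (hdom' c (List.mem_of_mem_drop hc))
    simpa [pvVOK] using this
  have hfc' : (PySem.Chars.isalnum (PySem.Chars.lowerChar fc) || PySem.Chars.lowerChar fc == '-') = true := by
    have := pvVOK_lower fc hfc
    rw [pvVOK] at this
    rw [this]; simpa [pvVOK] using hv
  simp only [List.all_cons, List.all_nil, Function.comp_def, hfc', htake, hdrop, pvGood]
  simp [Bool.and_comm]

-- A's inner loop adds nothing when pvGood is false
theorem inner_skip (text : String) (hdom : Dom_generate_bitflip_variants text)
    (k : Nat) (c : Char) (hG : pvGood text.toList k = false) (variants : List String) :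
    (List.range 8).foldl (fun variants bit_pos =>
      match flip_bit c bit_pos with
      | none => variants
      | some flipped_char =>
        if PySem.Chars.isalnum flipped_char || flipped_char == '-' then
          let flipped := PySem.List.slice text.toList none (some (k : Int)) ++ [flipped_char]
              ++ PySem.List.slice text.toList (some ((k : Int) + 1)) none
          let flippedL := PySem.Chars.lower flipped
          if flippedL.all (fun c => PySem.Chars.isalnum c || c == '-') then
            PySem.Set.add variants (String.ofList flippedL)
          else variants
        else variants) variants = variants := by
  rw [PySem.List.foldl_congr_mem (g := fun acc _ => acc)]
  · exact PySem.List.foldl_ignore _ _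
  · intro acc bit _
    cases hf : flip_bit c bit with
    | none => rfl
    | some fc =>
      simp only
      split
      · rename_i hv
        rw [check_eq text hdom k fc (flip_bit_dom c bit fc hf) (by simpa [pvVOK] using hv), hG]
        simp
      · rfl

-- A's inner loop equals B's inner loop when pvGood is true
theorem inner_run (text : String) (hdom : Dom_generate_bitflip_variants text)
    (k : Nat) (c : Char) (hG : pvGood text.toList k = true) (variants : List String) :
    (List.range 8).foldl (fun variants bit_pos =>
      match flip_bit c bit_pos with
      | none => variants
      | some flipped_char =>
        if PySem.Chars.isalnum flipped_char || flipped_char == '-' then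
          let flipped := PySem.List.slice text.toList none (some (k : Int)) ++ [flipped_char]
              ++ PySem.List.slice text.toList (some ((k : Int) + 1)) none
          let flippedL := PySem.Chars.lower flipped
          if flippedL.all (fun c => PySem.Chars.isalnum c || c == '-') then
            PySem.Set.add variants (String.ofList flippedL)
          else variants
        else variants) variants
    = (List.range 8).foldl (fun variants bit =>
        match flip_bit c bit with
        | none => variants
        | some fc =>
          if PySem.Chars.isalnum fc || fc == '-' then
            PySem.Set.add variants (String.ofList (PySem.Chars.lower
              (PySem.List.slice text.toList none (some (k : Int)) ++ [fc]
                ++ PySem.List.slice text.toList (some ((k : Int) + 1)) none)))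
          else variants) variants := by
  apply PySem.List.foldl_congr_mem
  intro acc bit _
  cases hf : flip_bit c bit with
  | none => rfl
  | some fc =>
    simp only
    split
    · rename_i hv
      rw [check_eq text hdom k fc (flip_bit_dom c bit fc hf) (by simpa [pvVOK] using hv), hG]
      simp
    · rfl

-- ===== VERDICT (by name: the statement is the Claim_ definition above) =====
theorem generate_bitflip_variants_spec : Claim_equal_generate_bitflip_variants := by
  intro text hdom
  unfold Spec_generate_bitflip_variants generate_bitflip_variants generate_bitflip_variants_alt
  by_cases hlen : 2 ≤ (bad_indices text).length
  · -- two bad indices: A adds nothing, B returns []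
    simp only [hlen, if_true]
    have hGfalse : ∀ k : Nat, k < text.toList.length → pvGood text.toList k = false := by
      intro k hk
      by_contra h
      have hG : pvGood text.toList k = true := by
        cases hGb : pvGood text.toList k
        · exact absurd hGb h
        · rfl
      have hall := (pvGood_iff_bad text k hk).mp hG
      obtain ⟨b0, rest, hb⟩ : ∃ b0 rest, bad_indices text = b0 :: rest := by
        cases hbl : bad_indices text with
        | nil => rw [hbl] at hlen; simp at hlen
        | cons a t => exact ⟨a, t, rfl⟩
      obtain ⟨b1, rest', hb'⟩ : ∃ b1 rest', rest = b1 :: rest' := by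
        cases hbl : rest with
        | nil => rw [hb, hbl] at hlen; simp at hlen
        | cons a t => exact ⟨a, t, rfl⟩
      have hpw := bad_pairwise text
      rw [hb, hb', List.pairwise_cons] at hpw
      have hlt : b0 < b1 := hpw.1 b1 (by simp)
      have h0 := hall b0 (by rw [hb]; simp)
      have h1 := hall b1 (by rw [hb, hb']; simp)
      omega
    rw [PySem.List.foldl_congr_mem (g := fun acc _ => acc)]
    · exact PySem.List.foldl_ignore _ _
    · intro acc ic hic
      rw [PySem.List.mem_enumerate_iff] at hic
      obtain ⟨k, hk, rfl⟩ := hic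
      simp only [Int.zero_add]
      exact inner_skip text hdom k _ (hGfalse k hk) acc
  · -- at most one bad index
    simp only [hlen, if_false]
    apply PySem.List.foldl_congr_mem
    intro acc ic hic
    rw [PySem.List.mem_enumerate_iff] at hic
    obtain ⟨k, hk, rfl⟩ := hic
    simp only [Int.zero_add]
    cases hbl : bad_indices text with
    | nil =>
      have hG : pvGood text.toList k = true := by
        rw [pvGood_iff_bad text k hk, hbl]; simp
      simp only [List.isEmpty_nil, Bool.not_true, Bool.false_and]
      exact inner_run text hdom k _ hG acc
    | cons b0 rest =>
      have hrest : rest = [] := by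
        rw [hbl] at hlen
        cases rest with
        | nil => rfl
        | cons x t => exfalso; simp at hlen
      subst hrest
      by_cases hbk : b0 = (k : Int)
      · have hG : pvGood text.toList k = true := by
          rw [pvGood_iff_bad text k hk, hbl]
          intro j hj
          simp at hj
          rw [hj, hbk]
        simp only [hbk]
        simp only [List.isEmpty_cons, Bool.not_false, List.headD_cons, Bool.true_and, bne_self_eq_false]
        exact inner_run text hdom k _ hG acc
      · have hG : pvGood text.toList k = false := by
          cases hGb : pvGood text.toList k
          · rfl
          · have := (pvGood_iff_bad text k hk).mp hGb b0 (by rw [hbl]; simp)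
            exact absurd this hbk
        simp only [List.isEmpty_cons, Bool.not_false, List.headD_cons, Bool.true_and]
        have hne : (b0 != (k : Int)) = true := by simpa using hbk
        simp only [hne, if_true]
        exact inner_skip text hdom k _ hG acc
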